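-- pv_equiv track=rewrite | github.com/db213/Solving-Equations-over-Free-Groups | constraint_solver/solver/equation.py | _parse_constants
-- ===== SOURCE A (Python) =====
-- NEGATION = '*'
--
-- def _parse_constants(equation):
--     constants = []
--     const = ''
--     last_was_variable = False
--     for l in equation:
--         if l.isupper():
--             constants.append(const)
--             const = ''
--             last_was_variable = True
--         elif not l == NEGATION or not last_was_variable:
--             const = const + l
--             last_was_variable = False
--     constants.append(const)
--     return constants
-- ===== SOURCE B (Python) =====
-- def _parse_constants(equation):
--     segments = [[]]
--     for l in equation:
--         if l.isupper():
--             segments.append([])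
--         else:
--             segments[-1].append(l)
--     return [''.join(segments[0])] + [''.join(s).lstrip('*') for s in segments[1:]]
-- ===== Notes on version B (the rewrite author's own statement) =====
-- stated objective: simpler
-- what changed: Replaces the three-variable stateful loop (result list, current token, last_was_variable flag with conditional suppression of the negation character) by a two-phase decomposition: first split the string into segments at uppercase letters, then strip the leading run of negation characters from every segment after the first.
import Mathlib
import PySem

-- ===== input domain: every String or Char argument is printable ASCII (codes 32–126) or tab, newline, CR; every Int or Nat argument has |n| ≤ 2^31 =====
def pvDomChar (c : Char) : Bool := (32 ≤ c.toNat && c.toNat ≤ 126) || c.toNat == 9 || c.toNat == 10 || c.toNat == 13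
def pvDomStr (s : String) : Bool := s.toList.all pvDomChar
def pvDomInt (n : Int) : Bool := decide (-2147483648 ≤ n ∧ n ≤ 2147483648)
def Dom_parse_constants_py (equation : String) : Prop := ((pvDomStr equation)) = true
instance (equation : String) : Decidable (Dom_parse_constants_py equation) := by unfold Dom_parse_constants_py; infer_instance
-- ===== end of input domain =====

-- B replaces A's stateful single loop (flag-guarded '*' suppression) by split-at-uppercase
-- then lstrip('*') on every segment after the first; objective: simpler decomposition.

-- ===== PORT A =====
-- the loop of A: state = (constants, const, last_was_variable)
def pvLoopA : List Char → List (List Char) → List Char → Bool → List (List Char)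
  | [], constants, const, _ => constants ++ [const]
  | l :: ls, constants, const, lastVar =>
    if PySem.Chars.isupper l then
      pvLoopA ls (constants ++ [const]) [] true
    else if (!(l == '*') || !lastVar) then
      pvLoopA ls constants (const ++ [l]) false
    else
      pvLoopA ls constants const lastVar

def parse_constants_py (equation : String) : List String :=
  (pvLoopA equation.toList [] [] false).map String.ofList

-- ===== PORT B =====
-- Source B's loop: segments (done ones in order) plus the segment currently being extended
def pvSegs : List Char → List Char → List (List Char)
  | [], cur => [cur]
  | l :: ls, cur =>
    if PySem.Chars.isupper l then cur :: pvSegs ls []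
    else pvSegs ls (cur ++ [l])

def parse_constants_py_alt (equation : String) : List String :=
  match pvSegs equation.toList [] with
  | [] => []
  | s :: rest => String.ofList s :: rest.map (fun t => String.ofList (t.dropWhile (· == '*')))

-- ===== PRECONDITION & SPEC =====
def Spec_parse_constants_py (equation : String) (out : List String) : Prop := out = parse_constants_py_alt equation
instance (equation : String) (out : List String) : Decidable (Spec_parse_constants_py equation out) := by unfold Spec_parse_constants_py; infer_instance

-- ===== CLAIM (what is proved, stated in full; the proofs are below) =====
def Claim_equal_parse_constants_py : Prop := ∀ (equation : String), Dom_parse_constants_py equation → Spec_parse_constants_py equation (parse_constants_py equation)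

-- ===== LEMMAS AND PROOFS =====

theorem pv_dropWhile_append_not_all {p : Char → Bool} {xs : List Char} (l : Char)
    (h : xs.all p = false) :
    (xs ++ [l]).dropWhile p = xs.dropWhile p ++ [l] := by
  induction xs with
  | nil => simp at h
  | cons x xs ih =>
    by_cases hx : p x = true
    · rw [List.all_cons, hx, Bool.true_and] at h
      simp [List.dropWhile, hx]; exact ih h
    · simp [List.dropWhile, hx]

theorem pv_dropWhile_all {p : Char → Bool} {xs : List Char} (h : xs.all p = true) :
    xs.dropWhile p = [] :=
  List.dropWhile_eq_nil_iff.2 (fun x hx => List.all_eq_true.1 h x hx)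

theorem pv_dropWhile_append_all {p : Char → Bool} {xs : List Char} (l : Char)
    (h : xs.all p = true) :
    (xs ++ [l]).dropWhile p = List.dropWhile p [l] := by
  induction xs with
  | nil => simp
  | cons x xs ih =>
    rw [List.all_cons, Bool.and_eq_true] at h
    simp [List.dropWhile, h.1]
    exact ih h.2

theorem pv_dropWhile_append_not {p : Char → Bool} {xs : List Char} {l : Char}
    (h : p l = false) :
    (xs ++ [l]).dropWhile p = xs.dropWhile p ++ [l] := by
  by_cases ha : xs.all p = true
  · rw [pv_dropWhile_append_all l ha, pv_dropWhile_all ha]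
    simp [List.dropWhile, h]
  · exact pv_dropWhile_append_not_all l (by simpa using ha)

-- tail invariant: inside a segment that started right after a variable
theorem pv_tailInv (ls : List Char) : ∀ (cs : List (List Char)) (cur : List Char),
    pvLoopA ls cs (cur.dropWhile (· == '*')) (cur.all (· == '*'))
      = cs ++ (pvSegs ls cur).map (fun t => t.dropWhile (· == '*')) := by
  induction ls with
  | nil => intro cs cur; simp [pvLoopA, pvSegs]
  | cons l ls ih =>
    intro cs cur
    by_cases hu : PySem.Chars.isupper l = true
    · have := ih (cs ++ [cur.dropWhile (· == '*')]) []
      simp [pvLoopA, pvSegs, hu]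
      simpa [List.dropWhile] using this
    · by_cases hstar : l = '*'
      · have hl : (l == '*') = true := by simp [hstar]
        by_cases hall : cur.all (· == '*') = true
        · have hall' : (cur ++ [l]).all (· == '*') = true := by
            simp [List.all_append, hall, hstar]
          have hdw : (cur ++ [l]).dropWhile (· == '*') = cur.dropWhile (· == '*') := by
            rw [pv_dropWhile_all hall, pv_dropWhile_all hall']
          have := ih cs (cur ++ [l])
          rw [hdw, hall'] at this
          simpa [pvLoopA, pvSegs, hu, hl, hall] using this
        · have hallf : cur.all (· == '*') = false := by simpa using hall
          have hall' : (cur ++ [l]).all (· == '*') = false := by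
            simp [List.all_append, hallf]
          have hdw := pv_dropWhile_append_not_all (p := (· == '*')) l hallf
          have := ih cs (cur ++ [l])
          rw [hdw, hall'] at this
          simpa [pvLoopA, pvSegs, hu, hl, hallf] using this
      · have hl : (l == '*') = false := by simpa using hstar
        have hall' : (cur ++ [l]).all (· == '*') = false := by
          simp [List.all_append, hl]
        have hdw := pv_dropWhile_append_not (p := (· == '*')) (xs := cur) (l := l) hl
        have := ih cs (cur ++ [l])
        rw [hdw, hall'] at this
        simpa [pvLoopA, pvSegs, hu, hl] using this

-- mapping applied to all segments but the first
def pvHeadMap : List (List Char) → List (List Char)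
  | [] => []
  | s :: rest => s :: rest.map (fun t => t.dropWhile (· == '*'))

-- head invariant: inside the first segment the flag is false and nothing is stripped
theorem pv_headInv (ls : List Char) : ∀ (cs : List (List Char)) (cur : List Char),
    pvLoopA ls cs cur false = cs ++ pvHeadMap (pvSegs ls cur) := by
  induction ls with
  | nil => intro cs cur; simp [pvLoopA, pvSegs, pvHeadMap]
  | cons l ls ih =>
    intro cs cur
    by_cases hu : PySem.Chars.isupper l = true
    · have := pv_tailInv ls (cs ++ [cur]) []
      simp [pvLoopA, pvSegs, pvHeadMap, hu]
      simpa [List.dropWhile] using this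
    · have := ih cs (cur ++ [l])
      simpa [pvLoopA, pvSegs, pvHeadMap, hu] using this

-- ===== VERDICT (by name: the statement is the Claim_ definition above) =====
theorem parse_constants_py_spec : Claim_equal_parse_constants_py := by
  intro equation _
  unfold Spec_parse_constants_py parse_constants_py parse_constants_py_alt
  rw [pv_headInv equation.toList [] []]
  cases h : pvSegs equation.toList [] with
  | nil => simp [pvHeadMap]
  | cons s rest => simp [pvHeadMap]
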